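-- pv_equiv track=rewrite | github.com/GeeGee1892/FPL-Analytics | fpl_assistant/services.py | get_current_gameweek
-- ===== SOURCE A (Python) =====
-- from typing import Optional, List, Dict, Tuple
--
-- def get_current_gameweek(events: List[Dict]) -> int:
--     for event in events:
--         if event.get("is_current"):
--             return event["id"]
--     for event in events:
--         if event.get("is_next"):
--             return event["id"]
--     return 1
-- ===== SOURCE B (Python) =====
-- from typing import Optional, List, Dict, Tuple
--
-- def get_current_gameweek(events: List[Dict]) -> int:
--     next_event = None
--     for event in events:
--         if event.get("is_current"):
--             return event["id"]
--         if event.get("is_next") and next_event is None: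
--             next_event = event
--     return next_event["id"] if next_event is not None else 1
-- ===== Notes on version B (the rewrite author's own statement) =====
-- stated objective: alternative
-- what changed: Two sequential scans (first for is_current, then for is_next) are merged into one pass that returns immediately on is_current and records the first is_next event as state, reading its id only after the loop (default 1).
import Mathlib
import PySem

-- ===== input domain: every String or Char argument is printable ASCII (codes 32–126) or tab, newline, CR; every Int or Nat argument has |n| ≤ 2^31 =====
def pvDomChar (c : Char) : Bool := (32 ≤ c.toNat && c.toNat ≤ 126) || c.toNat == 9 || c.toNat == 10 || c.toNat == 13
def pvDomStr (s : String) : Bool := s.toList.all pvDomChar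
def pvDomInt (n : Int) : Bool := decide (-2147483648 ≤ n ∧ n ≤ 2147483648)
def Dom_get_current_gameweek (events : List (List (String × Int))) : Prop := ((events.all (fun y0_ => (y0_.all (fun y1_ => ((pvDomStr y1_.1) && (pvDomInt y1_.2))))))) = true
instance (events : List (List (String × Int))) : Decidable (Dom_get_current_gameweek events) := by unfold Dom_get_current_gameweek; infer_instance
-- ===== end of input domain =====

-- B merges A's two sequential scans into one pass carrying the first is_next event as state (its id read only after the loop); alternative decomposition, same cost, return value only.


-- ===== PORT A =====
-- event.get(k) truthiness: first match in the assoc list, truthy iff present and ≠ 0 (None/0 falsy) — exact.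
def gcwTruthy (e : List (String × Int)) (k : String) : Bool :=
  match e.lookup k with
  | some v => v != 0
  | none => false

-- event["id"]: first match; under Pre_ the key is present, so the default 0 is never used (Python raises KeyError when absent).
def gcwId (e : List (String × Int)) : Int := (e.lookup "id").getD 0

-- first scan of A: first event with truthy "is_current"
def gcwFindCur : List (List (String × Int)) → Option Int
  | [] => none
  | e :: rest => if gcwTruthy e "is_current" then some (gcwId e) else gcwFindCur rest

-- second scan of A: first event with truthy "is_next"
def gcwFindNext : List (List (String × Int)) → Option Int
  | [] => none
  | e :: rest => if gcwTruthy e "is_next" then some (gcwId e) else gcwFindNext rest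

def get_current_gameweek (events : List (List (String × Int))) : Int :=
  match gcwFindCur events with
  | some i => i
  | none =>
    match gcwFindNext events with
    | some i => i
    | none => 1

-- ===== PORT B =====
-- single pass: return event["id"] on is_current, record the first is_next EVENT in the accumulator,
-- and only after the loop read its "id" (default 1 if none was recorded)
def gcwLoop : List (List (String × Int)) → Option (List (String × Int)) → Int
  | [], acc => match acc with
               | some e => gcwId e
               | none => 1
  | e :: rest, acc =>
    if gcwTruthy e "is_current" then gcwId e
    else if gcwTruthy e "is_next" && acc.isNone then gcwLoop rest (some e)
    else gcwLoop rest acc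

def get_current_gameweek_alt (events : List (List (String × Int))) : Int :=
  gcwLoop events none

-- ===== PRECONDITION & SPEC =====
-- true iff the event (if any) has an "id" key
def gcwIdOk (o : Option (List (String × Int))) : Bool :=
  match o with
  | some e => (e.lookup "id").isSome
  | none => true

-- Pre_ excludes exactly the inputs on which A (and likewise B) raises KeyError: the first event with a truthy
-- "is_current" lacks "id", or there is no such event and the first event with a truthy "is_next" lacks "id".
def Pre_get_current_gameweek (events : List (List (String × Int))) : Prop :=
  gcwIdOk (events.find? (fun e => gcwTruthy e "is_current")) = true ∧
  ((events.find? (fun e => gcwTruthy e "is_current")).isNone = true →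
    gcwIdOk (events.find? (fun e => gcwTruthy e "is_next")) = true)
instance (events : List (List (String × Int))) : Decidable (Pre_get_current_gameweek events) := by unfold Pre_get_current_gameweek; infer_instance

def pvWitness_get_current_gameweek : (List (List (String × Int))) := [[("is_next", 1), ("id", 7)], [("is_current", 1), ("id", 8)]]

def Spec_get_current_gameweek (events : List (List (String × Int))) (out : Int) : Prop := out = get_current_gameweek_alt events
instance (events : List (List (String × Int))) (out : Int) : Decidable (Spec_get_current_gameweek events out) := by unfold Spec_get_current_gameweek; infer_instance

-- ===== CLAIM (what is proved, stated in full; the proofs are below) =====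
def Claim_equal_get_current_gameweek : Prop := ∀ (events : List (List (String × Int))), Dom_get_current_gameweek events → Pre_get_current_gameweek events → Spec_get_current_gameweek events (get_current_gameweek events)

-- ===== LEMMAS AND PROOFS =====
-- once the accumulator is set, the loop only looks for is_current
theorem gcwLoop_some (events : List (List (String × Int))) (v : List (String × Int)) :
    gcwLoop events (some v) = (gcwFindCur events).getD (gcwId v) := by
  induction events with
  | nil => rfl
  | cons e rest ih =>
    simp only [gcwLoop, gcwFindCur]
    by_cases h : gcwTruthy e "is_current" = true <;> simp [h, ih]

theorem gcwLoop_none (events : List (List (String × Int))) :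
    gcwLoop events none = get_current_gameweek events := by
  induction events with
  | nil => rfl
  | cons e rest ih =>
    simp only [gcwLoop, get_current_gameweek, gcwFindCur, gcwFindNext]
    by_cases hc : gcwTruthy e "is_current" = true
    · simp [hc]
    · by_cases hn : gcwTruthy e "is_next" = true
      · simp [hc, hn, gcwLoop_some]
        cases hcur : gcwFindCur rest <;> simp
      · simpa [hc, hn, get_current_gameweek] using ih

-- ===== VERDICT (by name: the statement is the Claim_ definition above) =====
theorem get_current_gameweek_spec : Claim_equal_get_current_gameweek := by
  intro events _ _
  unfold Spec_get_current_gameweek get_current_gameweek_alt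
  exact (gcwLoop_none events).symm
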